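-- pv_equiv track=rewrite | github.com/Dexaroz/Algorithms-AP-ULPGC-2023-24 | EXERCISES/TSP/solve_tsp.py | order_crossover
-- ===== SOURCE A (Python) =====
-- def order_crossover(parent1, parent2, lower_bound, upper_bound):
--     child1 = []
--
--     for i in range(lower_bound, upper_bound):
--         child1.append(parent1[i])
--
--     index = 0
--     for i in range(upper_bound, len(parent1)):
--         if parent2[i] not in child1:
--             child1.append(parent2[i])
--             index += 1
--
--     index2 = 0
--     while ((upper_bound - lower_bound) + index) != (len(parent1) - lower_bound):
--         if parent2[index2] not in child1:
--             child1.append(parent2[index2])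
--             index += 1
--         index2 += 1
--
--     index = 0
--     for i in range(0, len(parent1)):
--         if parent2[i] not in child1:
--             child1.insert(index, parent2[i])
--             index += 1
--
--     return child1
-- ===== SOURCE B (Python) =====
-- def order_crossover(parent1, parent2, lower_bound, upper_bound):
--     n = len(parent1)
--     segment = parent1[lower_bound:upper_bound]
--     seen = set(segment)
--     ordered = []
--     for i in list(range(upper_bound, n)) + list(range(0, upper_bound)):
--         x = parent2[i]
--         if x not in seen:
--             ordered.append(x)
--             seen.add(x)
--     middle_len = n - upper_bound
--     return ordered[middle_len:] + segment + ordered[:middle_len]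
-- ===== Notes on version B (the rewrite author's own statement) =====
-- stated objective: simpler
-- what changed: Replaces A's four repeated-scan loops (segment copy, tail scan, a counting while-loop over parent2, and a final front-insertion pass) by one wrap-order scan of parent2 against a growing seen-set that builds a single ordering list, which is then reshaped by slicing around the copied segment; …
-- outside the precondition, e.g. on order_crossover([2, 4], [2, -1, 7, 5, -3, 10], 0, -1): A returns [10, 2, -1], B returns [2, 10, -1]; on order_crossover([1, 1], [1, 1, 5], 0, 1): A returns [1, 5], B returns [1]; on order_crossover([1, 2, 3], [3, 1, 2], -2, 3): A returns [2, 3, 1, 2, 3], B returns [1, 2, 3]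
import Mathlib
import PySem

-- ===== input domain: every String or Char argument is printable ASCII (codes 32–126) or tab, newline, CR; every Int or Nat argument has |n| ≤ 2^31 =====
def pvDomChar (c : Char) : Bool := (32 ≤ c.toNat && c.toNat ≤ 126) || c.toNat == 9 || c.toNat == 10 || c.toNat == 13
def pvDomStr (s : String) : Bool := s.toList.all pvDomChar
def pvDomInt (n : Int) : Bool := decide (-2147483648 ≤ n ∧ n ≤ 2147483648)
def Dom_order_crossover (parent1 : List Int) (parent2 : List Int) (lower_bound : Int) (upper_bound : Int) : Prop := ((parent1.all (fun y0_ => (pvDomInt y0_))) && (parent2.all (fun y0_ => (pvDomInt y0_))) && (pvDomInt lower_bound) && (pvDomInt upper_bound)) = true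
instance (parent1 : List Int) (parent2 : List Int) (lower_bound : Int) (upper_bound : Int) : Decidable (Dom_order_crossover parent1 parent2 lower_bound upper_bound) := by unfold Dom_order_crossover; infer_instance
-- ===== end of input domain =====

-- One honest line: B builds the OX ordering in one wrap-order scan with a growing seen-set and
-- reshapes it by slicing, instead of A's four repeated-scan loops with front insertions.

-- ===== PORT A =====
-- the 'while ((upper_bound - lower_bound) + index) != (len(parent1) - lower_bound)' loop of A,
-- transliterated with fuel; fuel parent2.length + 1 covers every terminating Python run (the
-- loop advances index2 by 1 each iteration and Python raises IndexError at index2 = len(parent2),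
-- which Pre_ excludes)
def oxWhile (parent2 : List Int) (lower_bound upper_bound n : Int) :
    List Int → Int → Int → Nat → List Int
  | child, _, _, 0 => child
  | child, index, index2, fuel + 1 =>
    if (upper_bound - lower_bound) + index ≠ n - lower_bound then
      let x := PySem.List.pyGetD parent2 index2 0
      if x ∉ child then
        oxWhile parent2 lower_bound upper_bound n (child ++ [x]) (index + 1) (index2 + 1) fuel
      else
        oxWhile parent2 lower_bound upper_bound n child index (index2 + 1) fuel
    else child

def order_crossover (parent1 : List Int) (parent2 : List Int) (lower_bound : Int) (upper_bound : Int) : List Int :=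
  -- child1 = [];  for i in range(lower_bound, upper_bound): child1.append(parent1[i])
  let child1 := (PySem.List.pyRange lower_bound upper_bound 1).foldl
      (fun c i => c ++ [PySem.List.pyGetD parent1 i 0]) []
  -- index = 0;  for i in range(upper_bound, len(parent1)): if parent2[i] not in child1: append; index += 1
  let s2 := (PySem.List.pyRange upper_bound (PySem.List.len parent1) 1).foldl
      (fun (s : List Int × Int) i =>
        let x := PySem.List.pyGetD parent2 i 0
        if x ∉ s.1 then (s.1 ++ [x], s.2 + 1) else s)
      (child1, 0)
  -- index2 = 0; while ...
  let child3 := oxWhile parent2 lower_bound upper_bound (PySem.List.len parent1)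
      s2.1 s2.2 0 (parent2.length + 1)
  -- index = 0;  for i in range(0, len(parent1)): if parent2[i] not in child1: insert(index, ...); index += 1
  let s4 := (PySem.List.pyRange 0 (PySem.List.len parent1) 1).foldl
      (fun (s : List Int × Int) i =>
        let x := PySem.List.pyGetD parent2 i 0
        if x ∉ s.1 then (PySem.List.insert s.1 s.2 x, s.2 + 1) else s)
      (child3, 0)
  s4.1

-- ===== PORT B =====
def order_crossover_alt (parent1 : List Int) (parent2 : List Int) (lower_bound : Int) (upper_bound : Int) : List Int :=
  let n := PySem.List.len parent1
  let segment := PySem.List.slice parent1 (some lower_bound) (some upper_bound)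
  let seen : PySem.Set Int := PySem.Set.ofList segment
  let s := (PySem.List.pyRange upper_bound n 1 ++ PySem.List.pyRange 0 upper_bound 1).foldl
      (fun (s : List Int × PySem.Set Int) i =>
        let x := PySem.List.pyGetD parent2 i 0
        if ¬ PySem.Set.contains s.2 x then (s.1 ++ [x], PySem.Set.add s.2 x) else s)
      ([], seen)
  let ordered := s.1
  let middle_len := n - upper_bound
  PySem.List.slice ordered (some middle_len) none
    ++ segment
    ++ PySem.List.slice ordered none (some middle_len)

-- ===== PRECONDITION & SPEC =====
-- Pre_ admits the inputs on which the OX recombination is well defined: crossover bounds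
-- 0 ≤ lower ≤ upper ≤ len(parent1), parent2 at least as long as parent1 and supplying enough
-- distinct values outside the copied segment (plus the empty-segment case upper < 0 with all
-- wrap-reads distinct); outside it A raises IndexError on most inputs, and on the out-of-range /
-- negative bounds or undersupplied parent2 where A still returns, range-by-range indexing (A's
-- reading) and Python slicing (B's) are two equally defensible readings, so neither value is specified.
def Pre_order_crossover (parent1 : List Int) (parent2 : List Int) (lower_bound : Int) (upper_bound : Int) : Prop :=
  (0 ≤ lower_bound ∧ 0 ≤ upper_bound ∧ upper_bound ≤ (parent1.length : Int) ∧
    parent1.length ≤ parent2.length ∧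
    (parent1.length : Int) - upper_bound ≤
      ((PySem.Set.ofList ((parent2.take parent1.length).filter
          (fun x => x ∉ (parent1.take upper_bound.toNat).drop lower_bound.toNat))).length : Int))
  ∨ (upper_bound < 0 ∧ upper_bound ≤ lower_bound ∧
    (lower_bound < 0 ∨ (parent1.length : Int) + upper_bound ≤ lower_bound) ∧
    -upper_bound ≤ (parent2.length : Int) ∧ parent1.length ≤ parent2.length ∧
    (parent2.drop ((parent2.length : Int) + upper_bound).toNat ++ parent2.take parent1.length).Nodup)

instance (parent1 : List Int) (parent2 : List Int) (lower_bound : Int) (upper_bound : Int) : Decidable (Pre_order_crossover parent1 parent2 lower_bound upper_bound) := by unfold Pre_order_crossover; infer_instance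

def pvWitness_order_crossover : List Int × List Int × Int × Int := ([1, 2, 3], [3, 1, 2], 1, 2)

def Spec_order_crossover (parent1 : List Int) (parent2 : List Int) (lower_bound : Int) (upper_bound : Int) (out : List Int) : Prop := out = order_crossover_alt parent1 parent2 lower_bound upper_bound
instance (parent1 : List Int) (parent2 : List Int) (lower_bound : Int) (upper_bound : Int) (out : List Int) : Decidable (Spec_order_crossover parent1 parent2 lower_bound upper_bound out) := by unfold Spec_order_crossover; infer_instance

-- ===== CLAIM (what is proved, stated in full; the proofs are below) =====
def Claim_equal_order_crossover : Prop := ∀ (parent1 : List Int) (parent2 : List Int) (lower_bound : Int) (upper_bound : Int), Dom_order_crossover parent1 parent2 lower_bound upper_bound → Pre_order_crossover parent1 parent2 lower_bound upper_bound → Spec_order_crossover parent1 parent2 lower_bound upper_bound (order_crossover parent1 parent2 lower_bound upper_bound)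

-- ===== LEMMAS AND PROOFS =====

-- 'news c xs': the values of xs, in first-occurrence order, that are new w.r.t. the growing
-- membership list (the common dedup core of A's append/insert loops and B's seen-set loop)
def news (c : List Int) : List Int → List Int
  | [] => []
  | x :: xs => if x ∈ c then news c xs else x :: news (c ++ [x]) xs

lemma news_congr : ∀ (xs c c' : List Int), (∀ a : Int, a ∈ c ↔ a ∈ c') → news c xs = news c' xs := by
  intro xs
  induction xs with
  | nil => intro c c' _; rfl
  | cons x xs ih =>
    intro c c' h
    simp only [news]
    by_cases hx : x ∈ c
    · rw [if_pos hx, if_pos ((h x).mp hx)]; exact ih c c' h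
    · rw [if_neg hx, if_neg (fun hc => hx ((h x).mpr hc))]
      congr 1
      exact ih _ _ (fun a => by simp [List.mem_append, h a])

lemma mem_news : ∀ (xs c : List Int) (a : Int), a ∈ news c xs ↔ a ∈ xs ∧ a ∉ c := by
  intro xs
  induction xs with
  | nil => simp [news]
  | cons x xs ih =>
    intro c a
    simp only [news]
    by_cases hx : x ∈ c
    · rw [if_pos hx, ih]
      constructor
      · rintro ⟨h1, h2⟩; exact ⟨List.mem_cons_of_mem _ h1, h2⟩
      · rintro ⟨h1, h2⟩
        rcases List.mem_cons.mp h1 with rfl | h1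
        · exact absurd hx h2
        · exact ⟨h1, h2⟩
    · rw [if_neg hx]
      by_cases hax : a = x
      · subst hax; simp [hx]
      · simp only [List.mem_cons, hax, false_or]
        rw [ih]
        simp [List.mem_append, hax]

lemma news_nodup : ∀ (xs c : List Int), (news c xs).Nodup := by
  intro xs
  induction xs with
  | nil => intro c; simp [news]
  | cons x xs ih =>
    intro c
    simp only [news]
    by_cases hx : x ∈ c
    · rw [if_pos hx]; exact ih c
    · rw [if_neg hx]
      refine List.nodup_cons.mpr ⟨?_, ih _⟩
      rw [mem_news]
      rintro ⟨_, h⟩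
      exact h (by simp)

lemma news_append : ∀ (xs ys c : List Int), news c (xs ++ ys) = news c xs ++ news (c ++ news c xs) ys := by
  intro xs
  induction xs with
  | nil => intro ys c; simp [news]
  | cons x xs ih =>
    intro ys c
    simp only [List.cons_append, news]
    by_cases hx : x ∈ c
    · rw [if_pos hx, if_pos hx, ih]
    · rw [if_neg hx, if_neg hx, ih]
      simp only [List.cons_append, List.append_assoc, List.nil_append]

lemma news_nil_of_forall_mem : ∀ (xs c : List Int), (∀ x ∈ xs, x ∈ c) → news c xs = [] := by
  intro xs
  induction xs with
  | nil => intro c _; rfl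
  | cons x xs ih =>
    intro c h
    simp only [news, if_pos (h x (by simp))]
    exact ih c (fun y hy => h y (by simp [hy]))

lemma news_eq_self : ∀ (xs c : List Int), xs.Nodup → (∀ x ∈ xs, x ∉ c) → news c xs = xs := by
  intro xs
  induction xs with
  | nil => intro c _ _; rfl
  | cons x xs ih =>
    intro c hnd h
    simp only [news, if_neg (h x (by simp))]
    congr 1
    refine ih _ (List.nodup_cons.mp hnd).2 ?_
    intro y hy
    simp only [List.mem_append, List.mem_singleton]
    rintro (hc | rfl)
    · exact h y (by simp [hy]) hc
    · exact (List.nodup_cons.mp hnd).1 hy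

lemma length_news_le : ∀ (xs c : List Int), (news c xs).length ≤ xs.length := by
  intro xs
  induction xs with
  | nil => intro c; simp [news]
  | cons x xs ih =>
    intro c
    simp only [news]
    by_cases hx : x ∈ c
    · rw [if_pos hx]; exact le_trans (ih c) (by simp)
    · rw [if_neg hx]; simpa using ih (c ++ [x])

lemma mem_closure : ∀ (xs c : List Int) (x : Int), x ∈ xs → x ∈ c ++ news c xs := by
  intro xs c x hx
  by_cases hc : x ∈ c
  · simp [hc]
  · simp [List.mem_append, mem_news, hx, hc]

lemma news_take : ∀ (xs c : List Int) (j : Nat),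
    news (c ++ (news c xs).take j) xs = (news c xs).drop j := by
  intro xs
  induction xs with
  | nil => intro c j; simp [news]
  | cons x xs ih =>
    intro c j
    by_cases hx : x ∈ c
    · have h1 : news c (x :: xs) = news c xs := by simp [news, hx]
      rw [h1]
      have h2 : news (c ++ (news c xs).take j) (x :: xs)
          = news (c ++ (news c xs).take j) xs := by
        simp [news, List.mem_append, hx]
      rw [h2, ih]
    · have h1 : news c (x :: xs) = x :: news (c ++ [x]) xs := by simp [news, hx]
      rw [h1]
      cases j with
      | zero => simpa using h1
      | succ j' =>
        rw [List.take_succ_cons, List.drop_succ_cons]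
        have h3 : news (c ++ x :: (news (c ++ [x]) xs).take j') (x :: xs)
            = news ((c ++ [x]) ++ (news (c ++ [x]) xs).take j') xs := by
          rw [List.append_cons]
          simp only [news]
          rw [if_pos (by simp)]
        rw [h3, ih]

-- length of the distinct-new set is order independent: it equals the length of
-- Python's set(filter) used by Pre_
lemma length_news_eq_set (xs ys c : List Int) (hmem : ∀ a : Int, a ∈ xs ↔ a ∈ ys) :
    (news c xs).length = (PySem.Set.ofList (ys.filter (fun x => x ∉ c))).length := by
  refine List.Perm.length_eq ?_
  rw [List.perm_ext_iff_of_nodup (news_nodup xs c) (PySem.Set.nodup_ofList _)]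
  intro a
  rw [mem_news, PySem.Set.mem_ofList, List.mem_filter]
  simp [hmem a]

-- [parent2[i] for i in range(a, b)] with 0 ≤ a, b ≤ len: a contiguous window
lemma map_getD_seg (xs : List Int) (a b : Int) (ha : 0 ≤ a) (hb : b ≤ (xs.length : Int)) :
    (PySem.List.pyRange a b 1).map (fun i => PySem.List.pyGetD xs i 0)
      = (xs.take b.toNat).drop a.toNat := by
  obtain ⟨d, hd⟩ : ∃ d : Nat, (b - a).toNat = d := ⟨_, rfl⟩
  induction d generalizing a with
  | zero =>
    rw [PySem.List.pyRange_one_eq_nil (by omega), List.map_nil]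
    symm
    rw [List.drop_eq_nil_iff, List.length_take]
    omega
  | succ d' ih =>
    have hab : a < b := by omega
    rw [PySem.List.pyRange_one_cons hab, List.map_cons]
    have hax : a.toNat < (xs.take b.toNat).length := by
      rw [List.length_take]; omega
    rw [List.drop_eq_getElem_cons hax]
    have h1 : PySem.List.pyGetD xs a 0 = (xs.take b.toNat)[a.toNat]'hax := by
      rw [PySem.List.pyGetD_eq_getElem xs 0 ha (by omega)]
      simp [List.getElem_take]
    have h2 := ih (a + 1) (by omega) (by omega)
    have h3 : (a + 1).toNat = a.toNat + 1 := by omega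
    rw [h1, h2, h3]

-- [parent2[i] for i in range(a, 0)] with -len ≤ a ≤ 0: the wrap window at the end
lemma map_getD_neg (xs : List Int) (a : Int) (h1 : -(xs.length : Int) ≤ a) (h2 : a ≤ 0) :
    (PySem.List.pyRange a 0 1).map (fun i => PySem.List.pyGetD xs i 0)
      = xs.drop ((xs.length : Int) + a).toNat := by
  obtain ⟨d, hd⟩ : ∃ d : Nat, (-a).toNat = d := ⟨_, rfl⟩
  induction d generalizing a with
  | zero =>
    rw [PySem.List.pyRange_one_eq_nil (by omega), List.map_nil]
    symm
    rw [List.drop_eq_nil_iff]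
    omega
  | succ d' ih =>
    have ha : a < 0 := by omega
    rw [PySem.List.pyRange_one_cons ha, List.map_cons]
    have hax : ((xs.length : Int) + a).toNat < xs.length := by omega
    rw [List.drop_eq_getElem_cons hax]
    have hg : PySem.List.pyGetD xs a 0 = xs[((xs.length : Int) + a).toNat]'hax := by
      have hk1 : (0 : Nat) < (-a).toNat := by omega
      have hk2 : (-a).toNat ≤ xs.length := by omega
      have hgn := PySem.List.pyGetD_neg_natCast xs (-a).toNat 0 hk1 hk2
      rw [show -(((-a).toNat : Nat) : Int) = a from by omega] at hgn
      rw [hgn]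
      simp only [show xs.length - (-a).toNat = ((xs.length : Int) + a).toNat from by omega]
    have h4 := ih (a + 1) (by omega) (by omega) (by omega)
    have h5 : ((xs.length : Int) + (a + 1)).toNat = ((xs.length : Int) + a).toNat + 1 := by omega
    rw [hg, h4, h5]

-- A's second loop (append + counter) over any index list
lemma loop2_eq (p2 : List Int) : ∀ (L : List Int) (c : List Int) (ix : Int),
    L.foldl (fun (s : List Int × Int) i =>
        let x := PySem.List.pyGetD p2 i 0
        if x ∉ s.1 then (s.1 ++ [x], s.2 + 1) else s) (c, ix)
      = (c ++ news c (L.map (fun i => PySem.List.pyGetD p2 i 0)),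
         ix + ((news c (L.map (fun i => PySem.List.pyGetD p2 i 0))).length : Int)) := by
  intro L
  induction L with
  | nil => intro c ix; simp [news]
  | cons i L ih =>
    intro c ix
    simp only [List.foldl_cons, List.map_cons, news]
    by_cases hx : PySem.List.pyGetD p2 i 0 ∈ c
    · rw [if_pos hx]
      show L.foldl _ (if PySem.List.pyGetD p2 i 0 ∉ c then _ else (c, ix)) = _
      rw [if_neg (not_not_intro hx)]
      exact ih c ix
    · rw [if_neg hx]
      show L.foldl _ (if PySem.List.pyGetD p2 i 0 ∉ c then (c ++ [PySem.List.pyGetD p2 i 0], ix + 1) else _) = _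
      rw [if_pos hx, ih]
      simp only [Prod.mk.injEq]
      constructor
      · simp only [List.cons_append, List.append_assoc, List.nil_append]
      · simp only [List.length_cons]
        push_cast
        ring

-- A's fourth loop: insert-at-cursor; the cursor always equals the number of inserted elements,
-- so the loop prepends the new values in scan order
lemma loop4_eq (p2 : List Int) : ∀ (L : List Int) (c0 ins : List Int),
    (L.foldl (fun (s : List Int × Int) i =>
        let x := PySem.List.pyGetD p2 i 0
        if x ∉ s.1 then (PySem.List.insert s.1 s.2 x, s.2 + 1) else s)
      (ins ++ c0, (ins.length : Int))).1
      = ins ++ news (ins ++ c0) (L.map (fun i => PySem.List.pyGetD p2 i 0)) ++ c0 := by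
  intro L
  induction L with
  | nil => intro c0 ins; simp [news]
  | cons i L ih =>
    intro c0 ins
    simp only [List.foldl_cons, List.map_cons, news]
    by_cases hx : PySem.List.pyGetD p2 i 0 ∈ ins ++ c0
    · rw [if_pos hx]
      show (L.foldl _ (if PySem.List.pyGetD p2 i 0 ∉ ins ++ c0 then _ else (ins ++ c0, (ins.length : Int)))).1 = _
      rw [if_neg (not_not_intro hx)]
      exact ih c0 ins
    · rw [if_neg hx]
      show (L.foldl _ (if PySem.List.pyGetD p2 i 0 ∉ ins ++ c0 then
          (PySem.List.insert (ins ++ c0) ((ins.length : Int)) (PySem.List.pyGetD p2 i 0),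
            (ins.length : Int) + 1) else _)).1 = _
      rw [if_pos hx]
      have hins : PySem.List.insert (ins ++ c0) ((ins.length : Int)) (PySem.List.pyGetD p2 i 0)
          = (ins ++ [PySem.List.pyGetD p2 i 0]) ++ c0 := by
        rw [PySem.List.insert_natCast (ins ++ c0) ins.length _ (by simp)]
        rw [List.take_left, List.drop_left]
        rw [List.append_cons]
      have hlen : (ins.length : Int) + 1 = (((ins ++ [PySem.List.pyGetD p2 i 0]).length : Nat) : Int) := by
        simp
      rw [hins, hlen, ih c0 (ins ++ [PySem.List.pyGetD p2 i 0])]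
      have hcongr : news ((ins ++ [PySem.List.pyGetD p2 i 0]) ++ c0) (L.map (fun i => PySem.List.pyGetD p2 i 0))
          = news ((ins ++ c0) ++ [PySem.List.pyGetD p2 i 0]) (L.map (fun i => PySem.List.pyGetD p2 i 0)) := by
        refine news_congr _ _ _ ?_
        intro a; simp only [List.mem_append, List.mem_singleton]; tauto
      rw [hcongr]
      simp only [List.cons_append, List.append_assoc, List.nil_append]

-- the while loop: scans parent2 from index2 on, appending new values, and stops exactly when
-- index reaches n - upper_bound
lemma oxWhile_eq (p2 : List Int) (l u n : Int) :
    ∀ (fuel : Nat) (j : Nat) (c : List Int) (ix : Int),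
      ix ≤ n - u →
      n - u - ix ≤ (((news c (p2.drop j)).length : Nat) : Int) →
      p2.length + 1 - j ≤ fuel →
      oxWhile p2 l u n c ix (j : Int) fuel
        = c ++ (news c (p2.drop j)).take (n - u - ix).toNat := by
  intro fuel
  induction fuel with
  | zero =>
    intro j c ix h1 h2 h3
    have hj : p2.length ≤ j := by omega
    rw [List.drop_eq_nil_of_le hj] at h2 ⊢
    simp only [news, List.length_nil] at h2
    have hix : ix = n - u := by omega
    simp [oxWhile, news]
  | succ fuel ih =>
    intro j c ix h1 h2 h3
    by_cases hix : ix = n - u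
    · subst hix
      simp only [oxWhile]
      rw [if_neg (by omega)]
      simp
    · have hlt : ix < n - u := by omega
      have hne : p2.drop j ≠ [] := by
        intro hnil
        rw [hnil] at h2
        simp [news] at h2
        omega
      have hjlen : j < p2.length := by
        by_contra h
        exact hne (List.drop_eq_nil_of_le (by omega))
      have hdrop : p2.drop j = p2[j] :: p2.drop (j + 1) := List.drop_eq_getElem_cons hjlen
      have hget : PySem.List.pyGetD p2 ((j : Nat) : Int) 0 = p2[j] := by
        rw [PySem.List.pyGetD_eq_getElem p2 0 (by omega) (by exact_mod_cast hjlen)]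
        simp
      simp only [oxWhile]
      rw [if_pos (by omega)]
      show (if PySem.List.pyGetD p2 ((j : Nat) : Int) 0 ∉ c then _ else _) = _
      rw [hget]
      have hjc : ((j : Nat) : Int) + 1 = (((j + 1 : Nat) : Nat) : Int) := by push_cast; ring
      by_cases hmem : p2[j] ∈ c
      · rw [if_neg (not_not_intro hmem)]
        have hnews : news c (p2.drop j) = news c (p2.drop (j + 1)) := by
          rw [hdrop]; simp [news, hmem]
        rw [hjc, ih (j + 1) c ix h1 (by rw [← hnews]; exact h2) (by omega), hnews]
      · rw [if_pos hmem]
        have hnews : news c (p2.drop j) = p2[j] :: news (c ++ [p2[j]]) (p2.drop (j + 1)) := by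
          rw [hdrop]; simp [news, hmem]
        rw [hjc, ih (j + 1) (c ++ [p2[j]]) (ix + 1) (by omega)
          (by rw [hnews] at h2; simp only [List.length_cons] at h2; push_cast at h2 ⊢; omega)
          (by omega)]
        rw [hnews]
        have htn : (n - u - ix).toNat = (n - u - (ix + 1)).toNat + 1 := by omega
        rw [htn, List.take_succ_cons]
        simp only [List.cons_append, List.append_assoc, List.nil_append]

lemma oxWhile_eq0 (p2 : List Int) (l u n : Int) (fuel : Nat) (c : List Int) (ix : Int)
    (h1 : ix ≤ n - u) (h2 : n - u - ix ≤ ((news c p2).length : Int))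
    (h3 : p2.length + 1 ≤ fuel) :
    oxWhile p2 l u n c ix 0 fuel = c ++ (news c p2).take (n - u - ix).toNat := by
  have h := oxWhile_eq p2 l u n fuel 0 c ix h1 (by simpa using h2) (by omega)
  simpa using h

lemma oxWhile_stop (p2 : List Int) (l u n : Int) (c : List Int) (ix index2 : Int) (fuel : Nat)
    (h : (u - l) + ix = n - l) (hf : 0 < fuel) :
    oxWhile p2 l u n c ix index2 fuel = c := by
  cases fuel with
  | zero => omega
  | succ fuel => simp only [oxWhile]; rw [if_neg (by omega)]

-- set(ys) grows by snoc when the element is new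
lemma ofList_snoc_of_not_mem (ys : List Int) (x : Int) (h : x ∉ ys) :
    PySem.Set.ofList (ys ++ [x]) = PySem.Set.ofList ys ++ [x] := by
  rw [PySem.Set.ofList_eq_foldl, PySem.Set.ofList_eq_foldl, List.foldl_append]
  simp only [List.foldl_cons, List.foldl_nil]
  show PySem.Set.add _ x = _
  rw [PySem.Set.add]
  rw [if_neg (by
    rw [PySem.Set.contains, List.contains_iff_mem, ← PySem.Set.ofList_eq_foldl]
    simp [PySem.Set.mem_ofList, h])]

-- B's scan: the seen-set always equals set(base + ordered), so the scan computes 'news'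
lemma setscan_eq (p2 base : List Int) : ∀ (L : List Int) (ord seen : List Int),
    seen = PySem.Set.ofList (base ++ ord) →
    (L.foldl (fun (s : List Int × PySem.Set Int) i =>
        let x := PySem.List.pyGetD p2 i 0
        if ¬ PySem.Set.contains s.2 x then (s.1 ++ [x], PySem.Set.add s.2 x) else s)
      (ord, seen)).1
      = ord ++ news (base ++ ord) (L.map (fun i => PySem.List.pyGetD p2 i 0)) := by
  intro L
  induction L with
  | nil => intro ord seen _; simp [news]
  | cons i L ih =>
    intro ord seen hseen
    simp only [List.foldl_cons, List.map_cons, news]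
    have hcont : PySem.Set.contains seen (PySem.List.pyGetD p2 i 0) = true
        ↔ PySem.List.pyGetD p2 i 0 ∈ base ++ ord := by
      subst hseen
      rw [PySem.Set.contains, List.contains_iff_mem]
      exact PySem.Set.mem_ofList _ _
    by_cases hm : PySem.List.pyGetD p2 i 0 ∈ base ++ ord
    · rw [if_pos hm]
      show (L.foldl _ (if ¬ PySem.Set.contains seen (PySem.List.pyGetD p2 i 0) then _ else (ord, seen))).1 = _
      rw [if_neg (not_not_intro (hcont.mpr hm))]
      exact ih ord seen hseen
    · rw [if_neg hm]
      show (L.foldl _ (if ¬ PySem.Set.contains seen (PySem.List.pyGetD p2 i 0) then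
          (ord ++ [PySem.List.pyGetD p2 i 0], PySem.Set.add seen (PySem.List.pyGetD p2 i 0)) else _)).1 = _
      rw [if_pos (by simp only [hcont]; exact hm)]
      have hadd : PySem.Set.add seen (PySem.List.pyGetD p2 i 0)
          = PySem.Set.ofList (base ++ (ord ++ [PySem.List.pyGetD p2 i 0])) := by
        subst hseen
        rw [PySem.Set.add]
        rw [if_neg (by simp only [hcont]; exact hm)]
        rw [← List.append_assoc]
        exact (ofList_snoc_of_not_mem _ _ hm).symm
      rw [ih (ord ++ [PySem.List.pyGetD p2 i 0]) _ hadd]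
      simp only [List.cons_append, List.append_assoc, List.nil_append]

-- the empty-slice characterisation used by the second Pre_ branch
lemma slice_nil_of_clamp_le (xs : List Int) (a b : Int)
    (h : PySem.List.clampIdx xs.length b ≤ PySem.List.clampIdx xs.length a) :
    PySem.List.slice xs (some a) (some b) = [] := by
  simp only [PySem.List.slice]
  rw [Nat.sub_eq_zero_of_le h]
  simp

-- family 1: 0 ≤ lower ≤ upper ≤ len(parent1), parent2 long and rich enough
lemma main_F0 (p1 p2 : List Int) (l u : Int)
    (hl : 0 ≤ l) (hu : 0 ≤ u) (hun : u ≤ (p1.length : Int)) (hnm : p1.length ≤ p2.length)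
    (hcount : (p1.length : Int) - u ≤
      ((PySem.Set.ofList ((p2.take p1.length).filter
          (fun x => x ∉ (p1.take u.toNat).drop l.toNat))).length : Int)) :
    order_crossover p1 p2 l u = order_crossover_alt p1 p2 l u := by
  have hnmi : (p1.length : Int) ≤ (p2.length : Int) := by exact_mod_cast hnm
  -- abbreviations
  have hun' : u.toNat ≤ p1.length := by omega
  have htakeU : (p2.take p1.length).take u.toNat = p2.take u.toNat := by
    rw [List.take_take]
    congr 1
    omega
  have htake_n : p2.take p1.length
      = p2.take u.toNat ++ (p2.take p1.length).drop u.toNat := by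
    conv_lhs => rw [← List.take_append_drop u.toNat (p2.take p1.length)]
    rw [htakeU]
  have hlen_rest2 : ((p2.take p1.length).drop u.toNat).length = p1.length - u.toNat := by
    rw [List.length_drop, List.length_take]
    omega
  have hW1le : (news ((p1.take u.toNat).drop l.toNat) ((p2.take p1.length).drop u.toNat)).length
      ≤ p1.length - u.toNat := hlen_rest2 ▸ length_news_le _ _
  set seg := (p1.take u.toNat).drop l.toNat with hsegdef
  set rest2 := (p2.take p1.length).drop u.toNat with hrest2def
  set front2 := p2.take u.toNat with hfront2def
  set W1 := news seg rest2 with hW1def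
  set W2 := news (seg ++ W1) front2 with hW2def
  set t := p1.length - u.toNat with htdef
  have hWW : news seg (rest2 ++ front2) = W1 ++ W2 := news_append _ _ _
  have hWmem : ∀ a : Int, a ∈ rest2 ++ front2 ↔ a ∈ p2.take p1.length := by
    intro a
    conv_rhs => rw [htake_n]
    simp only [List.mem_append]
    tauto
  have hWlen : (news seg (rest2 ++ front2)).length
      = (PySem.Set.ofList ((p2.take p1.length).filter (fun x => x ∉ seg))).length :=
    length_news_eq_set _ _ _ hWmem
  have hcount' : (p1.length : Int) - u ≤ ((W1 ++ W2).length : Int) := by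
    rw [← hWW, hWlen]
    exact hcount
  have hW2ge : t - W1.length ≤ W2.length := by
    rw [List.length_append] at hcount'
    omega
  -- the decomposition of news over the whole parent2 used by the while loop
  have hp2split : p2 = front2 ++ (rest2 ++ p2.drop p1.length) := by
    conv_lhs => rw [← List.take_append_drop p1.length p2, htake_n]
    rw [List.append_assoc]
  have hnews_p2 : news (seg ++ W1) p2
      = W2 ++ news ((seg ++ W1) ++ W2) (rest2 ++ p2.drop p1.length) := by
    conv_lhs => rw [hp2split]
    rw [news_append front2 (rest2 ++ p2.drop p1.length) (seg ++ W1)]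
  -- A's side
  have hA : order_crossover p1 p2 l u = (W1 ++ W2).drop t ++ (seg ++ (W1 ++ W2).take t) := by
    unfold order_crossover
    simp only [PySem.List.len_eq]
    rw [PySem.List.foldl_append_singleton_eq_map, map_getD_seg p1 l u hl hun, List.nil_append]
    rw [loop2_eq, map_getD_seg p2 u (p1.length : Int) hu hnmi]
    simp only [Int.toNat_natCast]
    simp only [← hsegdef, ← hrest2def, ← hW1def]
    rw [List.length_append] at hcount'
    rw [oxWhile_eq0 p2 l u (p1.length : Int) (p2.length + 1) (seg ++ W1)
      (0 + ((W1.length : Nat) : Int))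
      (by omega)
      (by
        rw [hnews_p2, List.length_append]
        push_cast
        omega)
      (by omega)]
    rw [hnews_p2, List.take_append_of_le_length (by omega)]
    rw [show ((p1.length : Int) - u - (0 + ((W1.length : Nat) : Int))).toNat
        = t - W1.length from by omega]
    have hchild3 : (seg ++ W1) ++ W2.take (t - W1.length) = seg ++ (W1 ++ W2).take t := by
      rw [List.take_append, List.take_of_length_le hW1le, List.append_assoc]
    rw [hchild3]
    have hl4 := loop4_eq p2 (PySem.List.pyRange 0 (p1.length : Int) 1)
      (seg ++ (W1 ++ W2).take t) []
    simp only [List.nil_append, List.length_nil, Nat.cast_zero] at hl4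
    rw [hl4, map_getD_seg p2 0 (p1.length : Int) le_rfl hnmi]
    simp only [Int.toNat_natCast, Int.toNat_zero, List.drop_zero]
    have hnews4 : news (seg ++ (W1 ++ W2).take t) (p2.take p1.length) = (W1 ++ W2).drop t := by
      conv_lhs => rw [htake_n]
      rw [news_append]
      have hc3 : seg ++ (W1 ++ W2).take t = (seg ++ W1) ++ W2.take (t - W1.length) := by
        rw [List.take_append, List.take_of_length_le hW1le, List.append_assoc]
      have hfront_eq : news (seg ++ (W1 ++ W2).take t) front2 = W2.drop (t - W1.length) := by
        rw [hc3]
        exact news_take front2 (seg ++ W1) (t - W1.length)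
      rw [hfront_eq]
      have hrest_nil : news ((seg ++ (W1 ++ W2).take t) ++ W2.drop (t - W1.length)) rest2 = [] := by
        apply news_nil_of_forall_mem
        intro x hx
        have hx' : x ∈ seg ++ W1 := mem_closure rest2 seg x hx
        have hx'' : x ∈ seg ++ (W1 ++ W2).take t := by
          rw [hc3]
          exact List.mem_append.mpr (Or.inl hx')
        simp only [List.mem_append] at hx'' ⊢
        tauto
      rw [hrest_nil, List.append_nil]
      rw [List.drop_append, List.drop_eq_nil_of_le hW1le, List.nil_append]
    rw [hnews4]
  -- B's side
  have hB : order_crossover_alt p1 p2 l u = (W1 ++ W2).drop t ++ (seg ++ (W1 ++ W2).take t) := by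
    unfold order_crossover_alt
    simp only [PySem.List.len_eq]
    rw [PySem.List.slice_toNat p1 hl hu, ← List.drop_take]
    simp only [← hsegdef]
    rw [setscan_eq p2 seg (PySem.List.pyRange u (p1.length : Int) 1
        ++ PySem.List.pyRange 0 u 1) [] _ (by rw [List.append_nil])]
    simp only [List.append_nil, List.nil_append, List.map_append]
    rw [map_getD_seg p2 u (p1.length : Int) hu hnmi,
      map_getD_seg p2 0 u le_rfl (by omega)]
    simp only [Int.toNat_natCast, Int.toNat_zero, List.drop_zero]
    simp only [← hrest2def, ← hfront2def]
    rw [hWW]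
    rw [PySem.List.slice_from _ (by omega : (0:Int) ≤ (p1.length : Int) - u),
      PySem.List.slice_to _ (by omega : (0:Int) ≤ (p1.length : Int) - u)]
    rw [show ((p1.length : Int) - u).toNat = t from by omega]
    simp [List.append_assoc]
  rw [hA, hB]

-- family 2: upper < 0 with an empty segment and pairwise-distinct wrap reads
lemma main_F2 (p1 p2 : List Int) (l u : Int)
    (hu : u < 0) (hul : u ≤ l) (hl : l < 0 ∨ (p1.length : Int) + u ≤ l)
    (hmu : -u ≤ (p2.length : Int)) (hnm : p1.length ≤ p2.length)
    (hnd : (p2.drop ((p2.length : Int) + u).toNat ++ p2.take p1.length).Nodup) :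
    order_crossover p1 p2 l u = order_crossover_alt p1 p2 l u := by
  have hnmi : (p1.length : Int) ≤ (p2.length : Int) := by exact_mod_cast hnm
  set R := p2.drop ((p2.length : Int) + u).toNat ++ p2.take p1.length with hRdef
  have hRlen : (R.length : Int) = (p1.length : Int) - u := by
    rw [List.length_append, List.length_drop, List.length_take]
    push_cast
    omega
  have hRvals : (PySem.List.pyRange u (p1.length : Int) 1).map
      (fun i => PySem.List.pyGetD p2 i 0) = R := by
    rw [PySem.List.pyRange_one_append u 0 (p1.length : Int) (by omega) (by omega),
      List.map_append, map_getD_neg p2 u (by omega) (by omega),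
      map_getD_seg p2 0 (p1.length : Int) le_rfl hnmi]
    simp only [Int.toNat_natCast, Int.toNat_zero, List.drop_zero]
    simp only [← hRdef]
  have hRnews : news [] R = R := news_eq_self R [] hnd (by simp)
  have htop_mem : ∀ x ∈ p2.take p1.length, x ∈ R := by
    intro x hx
    exact List.mem_append.mpr (Or.inr hx)
  -- A's side
  have hA : order_crossover p1 p2 l u = R := by
    unfold order_crossover
    simp only [PySem.List.len_eq]
    rw [PySem.List.pyRange_one_eq_nil hul]
    simp only [List.foldl_nil]
    rw [loop2_eq, hRvals, hRnews]
    rw [oxWhile_stop p2 l u (p1.length : Int) ([] ++ R) (0 + (R.length : Int)) 0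
      (p2.length + 1) (by omega) (by omega)]
    simp only [List.nil_append]
    have hl4 := loop4_eq p2 (PySem.List.pyRange 0 (p1.length : Int) 1) R []
    simp only [List.nil_append, List.length_nil, Nat.cast_zero] at hl4
    rw [hl4, map_getD_seg p2 0 (p1.length : Int) le_rfl hnmi]
    simp only [Int.toNat_natCast, Int.toNat_zero, List.drop_zero]
    rw [news_nil_of_forall_mem _ _ htop_mem]
    simp
  -- B's side
  have hB : order_crossover_alt p1 p2 l u = R := by
    unfold order_crossover_alt
    simp only [PySem.List.len_eq]
    have hsegnil : PySem.List.slice p1 (some l) (some u) = [] := by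
      apply slice_nil_of_clamp_le
      simp only [PySem.List.clampIdx]
      split_ifs <;> omega
    rw [hsegnil]
    rw [setscan_eq p2 [] (PySem.List.pyRange u (p1.length : Int) 1
        ++ PySem.List.pyRange 0 u 1) [] _ (by rfl)]
    simp only [List.nil_append, List.map_append]
    rw [PySem.List.pyRange_one_eq_nil (by omega : u ≤ 0)]
    simp only [List.map_nil, List.append_nil]
    rw [hRvals, hRnews]
    rw [PySem.List.slice_from _ (by omega : (0:Int) ≤ (p1.length : Int) - u),
      PySem.List.slice_to _ (by omega : (0:Int) ≤ (p1.length : Int) - u)]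
    rw [List.drop_eq_nil_of_le (by omega), List.take_of_length_le (by omega)]
    simp
  rw [hA, hB]

-- ===== VERDICT (by name: the statement is the Claim_ definition above) =====
theorem order_crossover_spec : Claim_equal_order_crossover := by
  intro p1 p2 l u _ hpre
  unfold Spec_order_crossover
  rcases hpre with ⟨h1, h2, h3, h4, h5⟩ | ⟨h1, h2, h3, h4, h5, h6⟩
  · exact main_F0 p1 p2 l u h1 h2 h3 h4 h5
  · exact main_F2 p1 p2 l u h1 h2 h3 h4 h5 h6
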